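-- pv_equiv track=rewrite | github.com/ShuB4545/password-strength-app | password_security_app.py | keyboard_walks
-- ===== SOURCE A (Python) =====
-- from typing import List, Tuple, Dict, Optional
--
-- KEYBOARD_ROWS = ["1234567890","qwertyuiop","asdfghjkl","zxcvbnm"]
--
-- def keyboard_walks(password: str, min_len: int = 4) -> List[str]:
--     p = password.lower()
--     findings = []
--     for row in KEYBOARD_ROWS:
--         for i in range(len(row) - min_len + 1):
--             seq = row[i:i+min_len]
--             if seq in p: findings.append(seq)
--         rev = row[::-1]
--         for i in range(len(rev) - min_len + 1):
--             seq = rev[i:i+min_len]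
--             if seq in p: findings.append(seq)
--     return list(set(findings))
-- ===== SOURCE B (Python) =====
-- from typing import List
--
-- KEYBOARD_ROWS = ["1234567890","qwertyuiop","asdfghjkl","zxcvbnm"]
--
-- def keyboard_walks(password: str, min_len: int = 4) -> List[str]:
--     # One left-to-right pass of the password per row/direction: run-length scan of
--     # consecutive-index chains (via a char->column map), no substring searches and
--     # no enumeration of row substrings; cost per direction is O(|password| + |row|),
--     # independent of min_len.
--     p = password.lower()
--     out = []
--     seen = set()
--     for row in KEYBOARD_ROWS:
--         for r in (row, row[::-1]):
--             index = {ch: j for j, ch in enumerate(r)}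
--             starts = set()
--             run = 0
--             prev = None
--             for ch in p:
--                 j = index.get(ch)
--                 if j is None:
--                     run = 0
--                 elif prev is not None and j == prev + 1:
--                     run += 1
--                 else:
--                     run = 1
--                 prev = j
--                 if j is not None and run >= min_len:
--                     starts.add(j - min_len + 1)
--             for j in sorted(starts):
--                 seq = r[j:j+min_len]
--                 if seq not in seen:
--                     seen.add(seq)
--                     out.append(seq)
--     return out
-- ===== Notes on version B (the rewrite author's own statement) =====
-- stated objective: alternative
-- what changed: B makes one left-to-right pass over the password per row/direction, run-length scanning chains of consecutive keyboard columns via a char-to-column map (then emitting r[j:j+min_len] for each recorded chain start), instead of enumerating every length-min_len row substring and substring-searching it in the password with a final list(set(...)) dedup.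
-- outside the precondition, e.g. on keyboard_walks('12345678', -2): A returns ['', '12345678'], B returns ['']
import Mathlib
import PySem

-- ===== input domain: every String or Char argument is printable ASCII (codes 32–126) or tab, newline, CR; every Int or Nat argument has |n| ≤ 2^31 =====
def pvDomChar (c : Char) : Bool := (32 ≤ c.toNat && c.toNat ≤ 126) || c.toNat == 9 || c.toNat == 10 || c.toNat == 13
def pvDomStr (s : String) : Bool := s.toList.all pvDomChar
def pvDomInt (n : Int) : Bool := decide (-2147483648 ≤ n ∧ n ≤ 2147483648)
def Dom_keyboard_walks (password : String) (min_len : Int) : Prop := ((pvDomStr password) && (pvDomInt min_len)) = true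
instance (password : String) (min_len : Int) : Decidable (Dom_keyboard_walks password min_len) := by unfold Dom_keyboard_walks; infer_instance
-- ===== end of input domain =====

-- B replaces A's enumerate-row-substrings-and-substring-search strategy by a single
-- left-to-right run-length scan of the password per row/direction over a char→column
-- map (alternative algorithm, not claimed faster).  Python's list(set(...)) hash
-- order is not modelled: both ports return first-occurrence candidate order;
-- outputs are compared as sets.


def pvKEYBOARD_ROWS : List String := ["1234567890", "qwertyuiop", "asdfghjkl", "zxcvbnm"]

-- ===== PORT A =====
def keyboard_walks (password : String) (min_len : Int) : List String :=
  let p := PySem.Str.lower password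
  let findings : List String := pvKEYBOARD_ROWS.foldl (fun findings row =>
    let findings := (PySem.List.pyRange 0 (PySem.Str.len row - min_len + 1) 1).foldl
      (fun acc i =>
        let seq := PySem.Str.slice row (some i) (some (i + min_len))
        if PySem.Str.isIn seq p then acc ++ [seq] else acc) findings
    let rev := (PySem.Str.slice? row none none (-1)).getD row  -- row[::-1]; never none
    (PySem.List.pyRange 0 (PySem.Str.len rev - min_len + 1) 1).foldl
      (fun acc i =>
        let seq := PySem.Str.slice rev (some i) (some (i + min_len))
        if PySem.Str.isIn seq p then acc ++ [seq] else acc) findings) []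
  -- list(set(findings)): hash order is not modelled; first-occurrence order, compared as a set
  PySem.Set.ofList findings

-- ===== PORT B =====
-- row[::-1]
def pvRev (row : String) : String := (PySem.Str.slice? row none none (-1)).getD row

-- {ch: j for j, ch in enumerate(r)}
def pvIndex (r : String) : PySem.Dict Char Int :=
  (PySem.List.enumerate r.toList 0).foldl (fun d jc => d.insert jc.2 jc.1) PySem.Dict.empty

-- the body of B's 'for ch in p' loop; state = (starts, run, prev)
def pvStep (index : PySem.Dict Char Int) (m : Int)
    (st : PySem.Set Int × Int × Option Int) (ch : Char) : PySem.Set Int × Int × Option Int :=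
  match PySem.Dict.get? index ch with
  | none => (st.1, 0, none)                                   -- j is None: run = 0
  | some jv =>
      let run : Int := match st.2.2 with
        | some pv => if jv = pv + 1 then st.2.1 + 1 else 1    -- prev is not None and j == prev+1
        | none => 1
      let starts := if m ≤ run then PySem.Set.add st.1 (jv - m + 1) else st.1
      (starts, run, some jv)

def keyboard_walks_alt (password : String) (min_len : Int) : List String :=
  let p := PySem.Str.lower password
  let res : PySem.Set String × List String :=
    pvKEYBOARD_ROWS.foldl (fun st row =>
      [row, pvRev row].foldl (fun st r =>
        let index := pvIndex r
        let scan := p.toList.foldl (pvStep index min_len) (PySem.Set.empty, 0, none)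
        (PySem.List.sorted scan.1 (fun x => x) false).foldl (fun st j =>
          let seq := PySem.Str.slice r (some j) (some (j + min_len))
          if PySem.Set.contains st.1 seq then st
          else (PySem.Set.add st.1 seq, st.2 ++ [seq])) st) st)
      (PySem.Set.empty, [])
  res.2

-- ===== PRECONDITION & SPEC =====
-- Pre_ excludes min_len ≤ 0, which is outside the natural domain of a length threshold:
-- there Python's negative slice bound i+min_len wraps to the end of the row, so A
-- accidentally also matches variable-length slices such as row[0:-2].
def Pre_keyboard_walks (password : String) (min_len : Int) : Prop := 1 ≤ min_len
instance (password : String) (min_len : Int) : Decidable (Pre_keyboard_walks password min_len) := by unfold Pre_keyboard_walks; infer_instance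
def pvWitness_keyboard_walks : String × Int := ("qwer1234X", 4)

def Spec_keyboard_walks (password : String) (min_len : Int) (out : List String) : Prop := out = keyboard_walks_alt password min_len
instance (password : String) (min_len : Int) (out : List String) : Decidable (Spec_keyboard_walks password min_len out) := by unfold Spec_keyboard_walks; infer_instance

-- ===== CLAIM (what is proved, stated in full; the proofs are below) =====
def Claim_equal_keyboard_walks : Prop := ∀ (password : String) (min_len : Int), Dom_keyboard_walks password min_len → Pre_keyboard_walks password min_len → Spec_keyboard_walks password min_len (keyboard_walks password min_len)

-- ===== LEMMAS AND PROOFS =====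

-- the candidates one string contributes, and all candidates in generation order
def pvCands (r : String) (L : Int) : List String :=
  (PySem.List.pyRange 0 (PySem.Str.len r - L + 1) 1).map
    (fun i => PySem.Str.slice r (some i) (some (i + L)))

def pvAllCands (L : Int) : List String :=
  pvKEYBOARD_ROWS.flatMap (fun row => pvCands row L ++ pvCands (pvRev row) L)

-- A's result: the candidate list filtered by substring search, deduplicated
theorem pvA_shape (password : String) (L : Int) :
    keyboard_walks password L =
      PySem.Set.ofList ((pvAllCands L).filter
        (fun s => PySem.Str.isIn s (PySem.Str.lower password))) := by
  unfold keyboard_walks pvAllCands pvCands pvKEYBOARD_ROWS pvRev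
  simp only [List.foldl_cons, List.foldl_nil, List.flatMap_cons, List.flatMap_nil,
    PySem.List.foldl_append_if, List.filter_map, List.filter_append, List.append_nil,
    List.nil_append, List.append_assoc, Function.comp_def]

def pvScan (r : String) (m : Int) (p : List Char) : PySem.Set Int × Int × Option Int :=
  p.foldl (pvStep (pvIndex r) m) (PySem.Set.empty, 0, none)

def pvMatches (p : String) (r : String) (m : Int) : List String :=
  (PySem.List.sorted (pvScan r m p.toList).1 (fun x => x) false).map
    (fun j => PySem.Str.slice r (some j) (some (j + m)))

def pvAllMatches (p : String) (m : Int) : List String :=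
  pvKEYBOARD_ROWS.flatMap (fun row => pvMatches p row m ++ pvMatches p (pvRev row) m)

theorem pv_pair_dedup (cs : List String) : ∀ s : List String,
    cs.foldl (fun st seq => if PySem.Set.contains st.1 seq then st
        else (PySem.Set.add st.1 seq, st.2 ++ [seq])) (s, s)
    = (cs.foldl PySem.Set.add s, cs.foldl PySem.Set.add s) := by
  induction cs with
  | nil => intro s; simp
  | cons c cs ih =>
    intro s
    by_cases hs : c ∈ s
    · simpa [hs, PySem.Set.add, PySem.Set.contains_iff] using ih s
    · have hadd : PySem.Set.add s c = s ++ [c] := by simp [PySem.Set.add, hs]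
      simpa [hs, PySem.Set.contains_iff, hadd] using ih (s ++ [c])

theorem pv_inner (r : String) (m : Int) (js : List Int) (s : List String) :
    js.foldl (fun st j =>
        let seq := PySem.Str.slice r (some j) (some (j + m))
        if PySem.Set.contains st.1 seq then st
        else (PySem.Set.add st.1 seq, st.2 ++ [seq])) (s, s)
    = ((js.map (fun j => PySem.Str.slice r (some j) (some (j + m)))).foldl PySem.Set.add s,
       (js.map (fun j => PySem.Str.slice r (some j) (some (j + m)))).foldl PySem.Set.add s) := by
  rw [← pv_pair_dedup, List.foldl_map]

theorem pvB_shape (password : String) (L : Int) :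
    keyboard_walks_alt password L =
      PySem.Set.ofList (pvAllMatches (PySem.Str.lower password) L) := by
  unfold keyboard_walks_alt pvAllMatches pvMatches pvScan pvKEYBOARD_ROWS
  simp only [List.foldl_cons, List.foldl_nil, List.flatMap_cons, List.flatMap_nil,
    List.append_nil]
  rw [show ((PySem.Set.empty : PySem.Set String), ([] : List String))
        = (([] : List String), ([] : List String)) from rfl]
  rw [pv_inner, pv_inner, pv_inner, pv_inner, pv_inner, pv_inner, pv_inner, pv_inner]
  simp only [PySem.Set.ofList_eq_foldl, List.foldl_append, List.append_assoc]

def pvDictOf (l : List Char) : PySem.Dict Char Int :=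
  (PySem.List.enumerate l 0).foldl (fun d jc => d.insert jc.2 jc.1) PySem.Dict.empty

theorem pvDictOf_concat (l : List Char) (a : Char) :
    pvDictOf (l ++ [a]) = (pvDictOf l).insert a (l.length : Int) := by
  unfold pvDictOf
  rw [PySem.List.enumerate_append, List.foldl_append]
  simp [PySem.List.enumerate_cons]

theorem pv_index_get (l : List Char) (hnd : l.Nodup) (c : Char) (v : Int) :
    (pvDictOf l).get? c = some v ↔ ∃ n : Nat, v = (n : Int) ∧ l[n]? = some c := by
  induction l using List.reverseRecOn with
  | nil =>
    simp [pvDictOf, PySem.List.enumerate_nil]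
  | append_singleton l a ih =>
    have hal : a ∉ l := by
      have h := hnd; rw [List.nodup_append] at h
      intro hm
      have := h.2.2
      simp [List.disjoint_singleton] at this
      exact this a hm rfl
    have hndl : l.Nodup := (List.nodup_append.mp hnd).1
    rw [pvDictOf_concat, PySem.Dict.get?_insert]
    by_cases hca : c = a
    · subst hca
      rw [if_pos rfl]
      constructor
      · rintro h
        exact ⟨l.length, by injection h with h; exact h.symm, List.getElem?_concat_length⟩
      · rintro ⟨n, hv, hn⟩
        obtain ⟨hlt, he⟩ := List.getElem?_eq_some_iff.mp hn
        by_cases hl : n < l.length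
        · exfalso
          rw [List.getElem?_append_left hl] at hn
          exact hal (List.mem_of_getElem? hn)
        · have hlen : n = l.length := by simp at hlt; omega
          subst hlen; rw [hv]
    · rw [if_neg hca, ih hndl]
      constructor
      · rintro ⟨n, hv, hn⟩
        obtain ⟨hlt, he⟩ := List.getElem?_eq_some_iff.mp hn
        exact ⟨n, hv, by rw [List.getElem?_append_left hlt]; exact hn⟩
      · rintro ⟨n, hv, hn⟩
        obtain ⟨hlt, he⟩ := List.getElem?_eq_some_iff.mp hn
        have hl : n < l.length := by
          simp at hlt
          rcases Nat.lt_or_ge n l.length with h | h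
          · exact h
          · exfalso
            have : n = l.length := by omega
            subst this
            rw [List.getElem?_concat_length] at hn
            exact hca (by injection hn with h; exact h.symm)
        refine ⟨n, hv, ?_⟩
        rw [List.getElem?_append_left hl] at hn
        exact hn

def pvChain (d : PySem.Dict Char Int) : Nat → Int → List Char → Prop
  | 0, _, _ => True
  | n+1, j, cs => ∃ cs' c, cs = cs' ++ [c] ∧ PySem.Dict.get? d c = some j ∧ pvChain d n (j-1) cs'

def pvScanD (d : PySem.Dict Char Int) (m : Int) (cs : List Char) : PySem.Set Int × Int × Option Int :=
  cs.foldl (pvStep d m) (PySem.Set.empty, 0, none)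

theorem pvScanD_concat (d : PySem.Dict Char Int) (m : Int) (cs : List Char) (c : Char) :
    pvScanD d m (cs ++ [c]) = pvStep d m (pvScanD d m cs) c := by
  unfold pvScanD; rw [List.foldl_append]; rfl

theorem pv_run_nonneg (d : PySem.Dict Char Int) (m : Int) (cs : List Char) :
    0 ≤ (pvScanD d m cs).2.1 := by
  induction cs using List.reverseRecOn with
  | nil => simp [pvScanD]
  | append_singleton cs c ih =>
    rw [pvScanD_concat]
    rcases h : PySem.Dict.get? d c with _ | jv
    · simp [pvStep, h]
    · rcases hp : (pvScanD d m cs).2.2 with _ | pv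
      · simp [pvStep, h, hp]
      · by_cases hj : jv = pv + 1 <;> simp [pvStep, h, hp, hj] <;> omega

theorem pv_prev_concat (d : PySem.Dict Char Int) (m : Int) (cs : List Char) (c : Char) :
    (pvScanD d m (cs ++ [c])).2.2 = PySem.Dict.get? d c := by
  rw [pvScanD_concat]
  rcases h : PySem.Dict.get? d c with _ | jv
  · simp [pvStep, h]
  · rcases hp : (pvScanD d m cs).2.2 with _ | pv
    · simp [pvStep, h, hp]
    · by_cases hj : jv = pv + 1 <;> simp [pvStep, h, hp, hj]

theorem pv_chain_run (d : PySem.Dict Char Int) (m : Int) :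
    ∀ (n : Nat) (j : Int) (cs : List Char), pvChain d (n+1) j cs →
      ((n : Int) + 1 ≤ (pvScanD d m cs).2.1 ∧ (pvScanD d m cs).2.2 = some j) := by
  intro n
  induction n with
  | zero =>
    rintro j cs ⟨cs', c, rfl, hget, -⟩
    rw [pvScanD_concat]
    rcases hp : (pvScanD d m cs').2.2 with _ | pv
    · constructor <;> simp [pvStep, hget, hp]
    · by_cases hj : j = pv + 1 <;>
        constructor <;> simp [pvStep, hget, hp, hj] <;>
        have := pv_run_nonneg d m cs' <;> omega
  | succ n ih =>
    rintro j cs ⟨cs', c, rfl, hget, hch⟩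
    obtain ⟨hrun, hprev⟩ := ih (j - 1) cs' hch
    rw [pvScanD_concat]
    have hj : j = (j - 1) + 1 := by omega
    constructor
    · simp [pvStep, hget, hprev]
      push_cast
      omega
    · simp [pvStep, hget, hprev]

theorem pv_run_chain (d : PySem.Dict Char Int) (m : Int) :
    ∀ (cs : List Char) (n : Nat), ((n : Int) + 1 ≤ (pvScanD d m cs).2.1) →
      ∃ j, (pvScanD d m cs).2.2 = some j ∧ pvChain d (n+1) j cs := by
  intro cs
  induction cs using List.reverseRecOn with
  | nil => intro n h; simp [pvScanD] at h; omega
  | append_singleton cs c ih =>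
    intro n h
    rw [pvScanD_concat] at h ⊢
    rcases hget : PySem.Dict.get? d c with _ | jv
    · simp only [pvStep, hget] at h; omega
    · rcases hp : (pvScanD d m cs).2.2 with _ | pv
      · simp only [pvStep, hget, hp] at h ⊢
        have hn : n = 0 := by omega
        subst hn
        exact ⟨jv, rfl, cs, c, rfl, hget, trivial⟩
      · by_cases hj : jv = pv + 1
        · simp only [pvStep, hget, hp, if_pos hj] at h ⊢
          rcases n with _ | k
          · exact ⟨jv, rfl, cs, c, rfl, hget, trivial⟩
          · have hk : (k : Int) + 1 ≤ (pvScanD d m cs).2.1 := by omega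
            obtain ⟨j', hj', hch⟩ := ih k hk
            have hje : j' = pv := by rw [hp] at hj'; exact (Option.some.inj hj').symm
            subst hje
            refine ⟨jv, rfl, cs, c, rfl, hget, ?_⟩
            have : jv - 1 = j' := by omega
            rw [this]; exact hch
        · simp only [pvStep, hget, hp, if_neg hj] at h ⊢
          have hn : n = 0 := by omega
          subst hn
          exact ⟨jv, rfl, cs, c, rfl, hget, trivial⟩

theorem pv_starts_concat_none (d : PySem.Dict Char Int) (m : Int) (cs : List Char) (c : Char)
    (hget : PySem.Dict.get? d c = none) :
    (pvScanD d m (cs ++ [c])).1 = (pvScanD d m cs).1 := by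
  rw [pvScanD_concat]; simp [pvStep, hget]

theorem pv_starts_concat_some (d : PySem.Dict Char Int) (m : Int) (cs : List Char) (c : Char)
    (jv : Int) (hget : PySem.Dict.get? d c = some jv) :
    (pvScanD d m (cs ++ [c])).1 =
      (if m ≤ (pvScanD d m (cs ++ [c])).2.1
       then PySem.Set.add (pvScanD d m cs).1 (jv - m + 1)
       else (pvScanD d m cs).1) := by
  rw [pvScanD_concat]
  rcases hp : (pvScanD d m cs).2.2 with _ | pv
  · simp [pvStep, hget, hp]
  · by_cases hj : jv = pv + 1 <;> simp [pvStep, hget, hp, hj]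

theorem pv_starts_mem_aux (d : PySem.Dict Char Int) (m : Int) :
    ∀ (cs : List Char) (x : Int), x ∈ (pvScanD d m cs).1 ↔
      ∃ cs', cs' <+: cs ∧ ∃ j, (pvScanD d m cs').2.2 = some j ∧
        m ≤ (pvScanD d m cs').2.1 ∧ x = j - m + 1 := by
  intro cs
  induction cs using List.reverseRecOn with
  | nil =>
    intro x
    simp only [pvScanD, List.foldl_nil]
    constructor
    · intro h; exact absurd h (by simp [PySem.Set.empty])
    · rintro ⟨cs', hpre, j, hprev, -⟩
      rw [List.prefix_nil.mp hpre] at hprev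
      simp at hprev
  | append_singleton cs c ih =>
    intro x
    have hsplit : ∀ P : List Char → Prop,
        (∃ cs', cs' <+: cs ++ [c] ∧ P cs') ↔ ((∃ cs', cs' <+: cs ∧ P cs') ∨ P (cs ++ [c])) := by
      intro P
      constructor
      · rintro ⟨cs', hpre, hP⟩
        rcases List.prefix_concat_iff.mp hpre with h | h
        · right; rw [← h]; exact hP
        · left; exact ⟨cs', h, hP⟩
      · rintro (⟨cs', hpre, hP⟩ | hP)
        · exact ⟨cs', hpre.trans (List.prefix_append cs [c]), hP⟩
        · exact ⟨cs ++ [c], List.prefix_refl _, hP⟩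
    rw [hsplit]
    rcases hget : PySem.Dict.get? d c with _ | jv
    · rw [pv_starts_concat_none d m cs c hget, ih]
      have hnone : (pvScanD d m (cs ++ [c])).2.2 = none := by
        rw [pv_prev_concat, hget]
      constructor
      · exact Or.inl
      · rintro (h | ⟨j, hprev, -⟩)
        · exact h
        · rw [hnone] at hprev; exact absurd hprev (by simp)
    · have hprevc : (pvScanD d m (cs ++ [c])).2.2 = some jv := by
        rw [pv_prev_concat, hget]
      rw [pv_starts_concat_some d m cs c jv hget]
      by_cases hR : m ≤ (pvScanD d m (cs ++ [c])).2.1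
      · rw [if_pos hR, PySem.Set.mem_add, ih]
        constructor
        · rintro (h | h)
          · exact Or.inl h
          · exact Or.inr ⟨jv, hprevc, hR, h⟩
        · rintro (h | ⟨j, hprev, -, hx⟩)
          · exact Or.inl h
          · refine Or.inr ?_
            rw [hprevc] at hprev
            have : jv = j := Option.some.inj hprev
            omega
      · rw [if_neg hR, ih]
        constructor
        · exact Or.inl
        · rintro (h | ⟨j, hprev, hrun, -⟩)
          · exact h
          · exact absurd hrun hR

theorem pv_chain_window (l : List Char) (hnd : l.Nodup) :
    ∀ (n : Nat) (j : Int) (cs : List Char), pvChain (pvDictOf l) (n+1) j cs →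
      ∃ nj : Nat, j = (nj : Int) ∧ n ≤ nj ∧ nj < l.length ∧
        ∃ cs0, cs = cs0 ++ ((l.drop (nj - n)).take (n+1)) := by
  intro n
  induction n with
  | zero =>
    rintro j cs ⟨cs', c, rfl, hget, -⟩
    obtain ⟨nj, hv, hn⟩ := (pv_index_get l hnd c j).mp hget
    obtain ⟨hlt, he⟩ := List.getElem?_eq_some_iff.mp hn
    refine ⟨nj, hv, Nat.zero_le _, hlt, cs', ?_⟩
    rw [Nat.sub_zero, List.drop_eq_getElem_cons hlt]
    simp [he]
  | succ n ih =>
    rintro j cs ⟨cs', c, rfl, hget, hch⟩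
    obtain ⟨nj', hv', hn', hlt', cs0, rfl⟩ := ih (j - 1) cs' hch
    obtain ⟨nj, hv, hn⟩ := (pv_index_get l hnd c j).mp hget
    obtain ⟨hlt, he⟩ := List.getElem?_eq_some_iff.mp hn
    have hnjs : nj = nj' + 1 := by omega
    refine ⟨nj, hv, by omega, hlt, cs0, ?_⟩
    have ha : nj - (n + 1) = nj' - n := by omega
    rw [ha]
    have hsplit : (l.drop (nj' - n)).take (n + 2) =
        (l.drop (nj' - n)).take (n + 1) ++ [c] := by
      rw [List.take_add_one, List.getElem?_drop]
      have : nj' - n + (n + 1) = nj := by omega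
      rw [this, hn]
      rfl
    rw [hsplit, ← List.append_assoc]

theorem pv_window_chain (l : List Char) (hnd : l.Nodup) :
    ∀ (n : Nat) (nj : Nat), n ≤ nj → nj < l.length → ∀ cs0 : List Char,
      pvChain (pvDictOf l) (n+1) (nj : Int) (cs0 ++ ((l.drop (nj - n)).take (n+1))) := by
  intro n
  induction n with
  | zero =>
    intro nj _ hlt cs0
    have hdrop : (l.drop nj).take 1 = [l[nj]] := by
      rw [List.drop_eq_getElem_cons hlt]; rfl
    rw [Nat.sub_zero, hdrop]
    exact ⟨cs0, l[nj], rfl,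
      (pv_index_get l hnd l[nj] nj).mpr ⟨nj, rfl, List.getElem?_eq_getElem hlt⟩, trivial⟩
  | succ n ih =>
    intro nj hn hlt cs0
    have h1 : 1 ≤ nj := by omega
    have hlt' : nj - 1 < l.length := by omega
    have hch := ih (nj - 1) (by omega) hlt' cs0
    have ha : nj - 1 - n = nj - (n + 1) := by omega
    have hsplit : (l.drop (nj - (n+1))).take (n + 2) =
        (l.drop (nj - (n+1))).take (n + 1) ++ [l[nj]] := by
      rw [List.take_add_one, List.getElem?_drop]
      have : nj - (n + 1) + (n + 1) = nj := by omega
      rw [this, List.getElem?_eq_getElem hlt]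
      rfl
    rw [hsplit, ← List.append_assoc]
    refine ⟨cs0 ++ (l.drop (nj - (n+1))).take (n + 1), l[nj], rfl,
      (pv_index_get l hnd l[nj] nj).mpr ⟨nj, rfl, List.getElem?_eq_getElem hlt⟩, ?_⟩
    have hcast : ((nj : Int) - 1) = ((nj - 1 : Nat) : Int) := by omega
    rw [hcast, ← ha]
    exact hch

theorem pv_infix_iff (w pl : List Char) :
    w <:+: pl ↔ ∃ cs', cs' <+: pl ∧ ∃ cs0, cs' = cs0 ++ w := by
  constructor
  · rintro ⟨s, t, rfl⟩
    exact ⟨s ++ w, ⟨t, by simp⟩, s, rfl⟩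
  · rintro ⟨cs', ⟨t, rfl⟩, cs0, rfl⟩
    exact ⟨cs0, t, by simp⟩

theorem pv_starts_char (l p : List Char) (hnd : l.Nodup) (m : Int) (hm : 1 ≤ m) (x : Int) :
    x ∈ (pvScanD (pvDictOf l) m p).1 ↔
      ∃ i : Nat, x = (i : Int) ∧ i + m.toNat ≤ l.length ∧ ((l.drop i).take m.toNat) <:+: p := by
  have hM1 : 1 ≤ m.toNat := by omega
  have hMm : ((m.toNat : Int)) = m := Int.toNat_of_nonneg (by omega)
  have hMsucc : m.toNat - 1 + 1 = m.toNat := by omega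
  rw [pv_starts_mem_aux]
  constructor
  · rintro ⟨cs', hpre, j, hprev, hrun, hx⟩
    have hrun' : ((m.toNat - 1 : Nat) : Int) + 1 ≤ (pvScanD (pvDictOf l) m cs').2.1 := by
      have : ((m.toNat - 1 : Nat) : Int) = m - 1 := by omega
      omega
    obtain ⟨j', hprev', hch⟩ := pv_run_chain (pvDictOf l) m cs' (m.toNat - 1) hrun'
    have hjj : j' = j := by rw [hprev] at hprev'; exact (Option.some.inj hprev').symm
    subst hjj
    obtain ⟨nj, hj, hn, hlt, cs0, hcs'⟩ := pv_chain_window l hnd (m.toNat - 1) j' cs' hch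
    rw [hMsucc] at hcs'
    refine ⟨nj - (m.toNat - 1), by omega, by omega, ?_⟩
    exact (pv_infix_iff _ p).mpr ⟨cs', hpre, cs0, hcs'⟩
  · rintro ⟨i, hx, hle, hinf⟩
    obtain ⟨cs', hpre, cs0, hcs'⟩ := (pv_infix_iff _ p).mp hinf
    have hi : i = (i + m.toNat - 1) - (m.toNat - 1) := by omega
    have hch := pv_window_chain l hnd (m.toNat - 1) (i + m.toNat - 1) (by omega) (by omega) cs0
    rw [hMsucc, ← hi] at hch
    rw [← hcs'] at hch
    have hch' : pvChain (pvDictOf l) (m.toNat - 1 + 1) ((i + m.toNat - 1 : Nat) : Int) cs' := by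
      rw [hMsucc]; exact hch
    obtain ⟨hrun, hprev⟩ := pv_chain_run (pvDictOf l) m (m.toNat - 1)
      ((i + m.toNat - 1 : Nat) : Int) cs' hch'
    refine ⟨cs', hpre, ((i + m.toNat - 1 : Nat) : Int), hprev, by omega, by omega⟩

theorem pv_starts_nodup (d : PySem.Dict Char Int) (m : Int) (cs : List Char) :
    ((pvScanD d m cs).1).Nodup := by
  induction cs using List.reverseRecOn with
  | nil => simp [pvScanD, PySem.Set.empty]
  | append_singleton cs c ih =>
    rcases hget : PySem.Dict.get? d c with _ | jv
    · rw [pv_starts_concat_none d m cs c hget]; exact ih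
    · rw [pv_starts_concat_some d m cs c jv hget]
      split
      · exact PySem.Set.nodup_add _ _ ih
      · exact ih

theorem pv_slice_toList (r : String) (n M : Nat) :
    (PySem.Str.slice r (some ((n : Int))) (some ((n : Int) + (M : Int)))).toList =
      (r.toList.drop n).take M := by
  rw [PySem.Str.toList_slice, PySem.Chars.slice_eq_listSlice]
  exact PySem.List.slice_natCast_add r.toList n M

theorem pv_sorted_starts (r : String) (p : String) (m : Int) (hm : 1 ≤ m)
    (hnd : r.toList.Nodup) :
    PySem.List.sorted (pvScan r m p.toList).1 (fun x => x) false
      = (PySem.List.pyRange 0 (PySem.Str.len r - m + 1) 1).filter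
          (fun i => PySem.Str.isIn (PySem.Str.slice r (some i) (some (i + m))) p) := by
  have hscan : pvScan r m p.toList = pvScanD (pvDictOf r.toList) m p.toList := rfl
  refine PySem.List.sorted_eq_of_perm_of_pairwise_lt _ _ _ ?_ ?_
  · -- the filtered range is a permutation of the starts set
    refine (List.perm_ext_iff_of_nodup ?_ ?_).mpr ?_
    · exact (PySem.List.nodup_pyRange_one _ _).filter _
    · rw [hscan]; exact pv_starts_nodup _ _ _
    · intro x
      rw [List.mem_filter, PySem.List.mem_pyRange_one, hscan,
        pv_starts_char r.toList p.toList hnd m hm x]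
      constructor
      · rintro ⟨⟨hx0, hxlt⟩, hpred⟩
        refine ⟨x.toNat, by omega, ?_, ?_⟩
        · rw [PySem.Str.len_eq] at hxlt; omega
        · rw [← pv_slice_toList r x.toNat m.toNat]
          have h1 : ((x.toNat : Int)) = x := by omega
          have h2 : ((x.toNat : Int)) + ((m.toNat : Int)) = x + m := by omega
          rw [h2, h1, ← PySem.Str.isIn_iff_infix]
          exact hpred
      · rintro ⟨i, rfl, hle, hinf⟩
        refine ⟨⟨by omega, ?_⟩, ?_⟩
        · rw [PySem.Str.len_eq]; omega
        · have h2 : ((i : Int)) + m = ((i : Int)) + ((m.toNat : Int)) := by omega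
          rw [h2, PySem.Str.isIn_iff_infix, pv_slice_toList r i m.toNat]
          exact hinf
  · exact (PySem.List.pairwise_lt_pyRange_one _ _).filter _

theorem pv_matches_eq (p r : String) (m : Int) (hm : 1 ≤ m) (hnd : r.toList.Nodup) :
    pvMatches p r m = (pvCands r m).filter (fun s => PySem.Str.isIn s p) := by
  unfold pvMatches pvCands
  rw [pv_sorted_starts r p m hm hnd, List.filter_map]
  simp only [Function.comp_def]

-- ===== VERDICT (by name: the statement is the Claim_ definition above) =====
theorem keyboard_walks_spec : Claim_equal_keyboard_walks := by
  intro password min_len _ hpre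
  unfold Spec_keyboard_walks
  rw [pvA_shape, pvB_shape]
  congr 1
  unfold pvAllMatches pvAllCands pvKEYBOARD_ROWS
  simp only [List.flatMap_cons, List.flatMap_nil, List.filter_append, List.append_nil]
  rw [pv_matches_eq _ _ _ hpre (by decide), pv_matches_eq _ _ _ hpre (by decide),
      pv_matches_eq _ _ _ hpre (by decide), pv_matches_eq _ _ _ hpre (by decide),
      pv_matches_eq _ _ _ hpre (by decide), pv_matches_eq _ _ _ hpre (by decide),
      pv_matches_eq _ _ _ hpre (by decide), pv_matches_eq _ _ _ hpre (by decide)]
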